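-- pv_equiv track=rewrite | github.com/sotthang/coding_study | 프로그래머스/lv1/42840. 모의고사/모의고사.py | solution
-- ===== SOURCE A (Python) =====
-- def solution(answers):
--     test1 = [1, 2, 3, 4, 5]
--     test2 = [2, 1, 2, 3, 2, 4, 2, 5]
--     test3 = [3, 3, 1, 1, 2, 2, 4, 4, 5, 5]
--     answer1, answer2, answer3 = 0, 0, 0
--     answer = []
--     for x in range(len(answers)):
--         if answers[x] == test1[x%5]:
--             answer1 += 1
--         if answers[x] == test2[x%8]:
--             answer2 += 1
--         if answers[x] == test3[x%10]:
--             answer3 += 1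
--     max_answer = max(answer1, answer2, answer3)
--     if max_answer == answer1:
--         answer.append(1)
--     if max_answer == answer2:
--         answer.append(2)
--     if max_answer == answer3:
--         answer.append(3)
--     return answer
-- ===== SOURCE B (Python) =====
-- def solution(answers):
--     patterns = [[1, 2, 3, 4, 5],
--                 [2, 1, 2, 3, 2, 4, 2, 5],
--                 [3, 3, 1, 1, 2, 2, 4, 4, 5, 5]]
--     # One pass: histogram of answers keyed by (position mod 40, value); 40 = lcm(5, 8, 10).
--     hist = {}
--     for i, a in enumerate(answers):
--         key = (i % 40, a)
--         hist[key] = hist.get(key, 0) + 1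
--     # Each student's score read off the 40-entry table; answers is never rescanned.
--     scores = [sum(hist.get((r, p[r % len(p)]), 0) for r in range(40)) for p in patterns]
--     best = max(scores)
--     return [k + 1 for k, s in enumerate(scores) if s == best]
-- ===== Notes on version B (the rewrite author's own statement) =====
-- stated objective: alternative
-- what changed: Replaced the per-position comparison against each pattern by a two-stage histogram algorithm: one pass builds a dict counting answers keyed by (position mod 40, value) (40 = lcm of the pattern lengths), then each student's score is read off the 40-entry table without rescanning answers, followed by a generic argmax collection.
import Mathlib
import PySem

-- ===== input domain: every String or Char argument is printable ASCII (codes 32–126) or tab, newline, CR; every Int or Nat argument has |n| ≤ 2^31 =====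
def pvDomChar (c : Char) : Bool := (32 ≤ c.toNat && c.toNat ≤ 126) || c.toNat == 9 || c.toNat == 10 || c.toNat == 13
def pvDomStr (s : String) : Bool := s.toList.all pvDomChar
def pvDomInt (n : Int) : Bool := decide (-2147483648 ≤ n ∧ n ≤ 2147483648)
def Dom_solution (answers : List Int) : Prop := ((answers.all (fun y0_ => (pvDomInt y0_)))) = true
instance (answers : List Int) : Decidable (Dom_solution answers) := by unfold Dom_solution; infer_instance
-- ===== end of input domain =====

-- B replaces A's three interleaved per-position counters by a two-stage histogram algorithm:
-- one pass builds a dict keyed by (position mod 40, value), then each student's score is read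
-- off the 40-entry table without rescanning the answers (objective: alternative).

-- ===== PORT A =====
def solution (answers : List Int) : List Int :=
  let test1 : List Int := [1, 2, 3, 4, 5]
  let test2 : List Int := [2, 1, 2, 3, 2, 4, 2, 5]
  let test3 : List Int := [3, 3, 1, 1, 2, 2, 4, 4, 5, 5]
  let r := (PySem.List.pyRange 0 (answers.length : Int) 1).foldl
    (fun (s : Int × Int × Int) x =>
      ((if PySem.List.pyGetD answers x 0 = PySem.List.pyGetD test1 (PySem.Int.mod x 5) 0 then s.1 + 1 else s.1),
       (if PySem.List.pyGetD answers x 0 = PySem.List.pyGetD test2 (PySem.Int.mod x 8) 0 then s.2.1 + 1 else s.2.1),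
       (if PySem.List.pyGetD answers x 0 = PySem.List.pyGetD test3 (PySem.Int.mod x 10) 0 then s.2.2 + 1 else s.2.2)))
    (0, 0, 0)
  let maxAnswer := max r.1 (max r.2.1 r.2.2)
  (if maxAnswer = r.1 then [(1 : Int)] else []) ++
  (if maxAnswer = r.2.1 then [(2 : Int)] else []) ++
  (if maxAnswer = r.2.2 then [(3 : Int)] else [])

-- ===== PORT B =====
def solution_alt (answers : List Int) : List Int :=
  let patterns : List (List Int) :=
    [[1, 2, 3, 4, 5], [2, 1, 2, 3, 2, 4, 2, 5], [3, 3, 1, 1, 2, 2, 4, 4, 5, 5]]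
  -- hist[key] = hist.get(key, 0) + 1  is exactly the counter update Dict.modify key 0 (· + 1)
  let hist : PySem.Dict (Int × Int) Int :=
    (PySem.List.enumerate answers).foldl
      (fun d ia => d.modify (PySem.Int.mod ia.1 40, ia.2) 0 (· + 1)) PySem.Dict.empty
  -- sum(hist.get((r, p[r % len(p)]), 0) for r in range(40))
  let scores := patterns.map (fun p =>
    ((PySem.List.pyRange 0 40 1).map
      (fun r => hist.getD (r, PySem.List.pyGetD p (PySem.Int.mod r (p.length : Int)) 0) 0)).sum)
  let best := (PySem.List.max? scores id).getD 0
  ((PySem.List.enumerate scores).filter (fun is => decide (is.2 = best))).map (fun is => is.1 + 1)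

-- ===== PRECONDITION & SPEC =====
def Spec_solution (answers : List Int) (out : List Int) : Prop := out = solution_alt answers
instance (answers : List Int) (out : List Int) : Decidable (Spec_solution answers out) := by unfold Spec_solution; infer_instance

-- ===== CLAIM (what is proved, stated in full; the proofs are below) =====
def Claim_equal_solution : Prop := ∀ (answers : List Int), Dom_solution answers → Spec_solution answers (solution answers)

-- ===== LEMMAS AND PROOFS =====

-- enumerate as a map over the index range (Nat-indexed form used to align both ports)
theorem enum_eq (xs : List Int) : ∀ (k : Nat),
    PySem.List.enumerate xs (k : Int) =
      (List.range xs.length).map (fun j => (((k + j : Nat) : Int), xs.getD j 0)) := by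
  induction xs with
  | nil => intro k; simp [PySem.List.enumerate]
  | cons a t ih =>
    intro k
    rw [PySem.List.enumerate_cons]
    have h : ((k : Int) + 1) = ((k + 1 : Nat) : Int) := by push_cast; ring
    rw [h, ih (k + 1)]
    simp [List.range_succ_eq_map, List.map_map, Function.comp]
    intro j hj; ring

-- a counting component of A's loop is a countP over the index range
theorem count_fold (p : Nat → Prop) [DecidablePred p] (l : List Nat) (c : Int) :
    l.foldl (fun (s : Int) j => if p j then s + 1 else s) c = c + (l.countP (fun j => decide (p j)) : Int) := by
  induction l generalizing c with
  | nil => simp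
  | cons a t ih =>
    by_cases h : p a
    · simp [h, ih]; omega
    · simp [h, ih]

-- a countP over the index range as a Finset sum of 0/1 indicators
theorem countP_sum (p : Nat → Bool) (n : Nat) :
    (List.countP p (List.range n) : Int) = ∑ j ∈ Finset.range n, (if p j then (1 : Int) else 0) := by
  induction n with
  | zero => simp
  | succ m ih => rw [List.range_succ, Finset.sum_range_succ, List.countP_append, ← ih]; by_cases h : p m <;> simp [h]

theorem enum0_eq (xs : List Int) :
    PySem.List.enumerate xs 0 = (List.range xs.length).map (fun (j : Nat) => ((j : Int), xs.getD j 0)) := by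
  simpa using enum_eq xs 0

-- B's table lookup sum for one pattern equals A's per-position match count
-- B's table lookup sum for one pattern equals A's per-position match count
theorem score_eq (answers p : List Int) (hdvd : p.length ∣ 40) :
    ((PySem.List.pyRange 0 40 1).map
      (fun r => ((PySem.List.enumerate answers).foldl
          (fun d ia => d.modify (PySem.Int.mod ia.1 40, ia.2) 0 (· + 1))
          (PySem.Dict.empty : PySem.Dict (Int × Int) Int)).getD
        (r, PySem.List.pyGetD p (PySem.Int.mod r (p.length : Int)) 0) 0)).sum
    = ((List.range answers.length).countP
        (fun j => decide (answers.getD j 0 = PySem.List.pyGetD p (PySem.Int.mod (j : Int) (p.length : Int)) 0)) : Int) := by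
  have h40 : ∀ j : Nat, PySem.Int.mod (j : Int) 40 = ((j % 40 : Nat) : Int) := fun j => by
    exact_mod_cast PySem.Int.mod_natCast j 40
  rw [enum0_eq, List.foldl_map]
  simp only [h40]
  rw [← List.foldl_map (f := fun (j : Nat) => ((((j % 40 : Nat) : Int), answers.getD j 0) : Int × Int))
      (g := fun (d : PySem.Dict (Int × Int) Int) k => d.modify k 0 (· + 1))]
  simp only [PySem.Dict.getD_foldl_modify_add_one, PySem.Dict.getD_empty, zero_add]
  rw [PySem.List.pyRange_one]
  simp only [List.map_map, Function.comp_def, zero_add, sub_zero,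
    List.count_eq_countP, List.countP_map]
  rw [show ((40 : Int).toNat) = 40 from rfl]
  have hsum : ∀ (F : Nat → Int), (List.map F (List.range 40)).sum = ∑ r ∈ Finset.range 40, F r :=
    fun F => rfl
  rw [hsum, countP_sum]
  simp only [countP_sum]
  rw [Finset.sum_comm]
  refine Finset.sum_congr rfl (fun j _ => ?_)
  simp only [beq_iff_eq, Prod.mk.injEq, decide_eq_true_eq, Nat.cast_inj,
    PySem.Int.mod_natCast, ite_and]
  rw [Finset.sum_ite_eq (Finset.range 40) (j % 40)
      (fun x => if answers.getD j 0 = PySem.List.pyGetD p (((x % p.length : Nat) : Int)) 0 then (1:Int) else 0)]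
  rw [if_pos (Finset.mem_range.mpr (Nat.mod_lt j (by norm_num)))]
  rw [Nat.mod_mod_of_dvd j hdvd]

-- max? of a three-element list
theorem max3 (s1 s2 s3 : Int) :
    (PySem.List.max? [s1, s2, s3] id).getD 0 = max s1 (max s2 s3) := by
  simp only [PySem.List.max?, List.foldl, id]
  split_ifs <;> simp_all <;> split_ifs <;> simp_all <;> try omega

theorem solution_eq_alt (answers : List Int) : solution answers = solution_alt answers := by
  unfold solution solution_alt
  rw [PySem.List.pyRange_one]
  simp only [List.foldl_map, zero_add, sub_zero, Int.toNat_natCast, PySem.List.pyGetD_natCast]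
  rw [show (fun (s : Int × Int × Int) (x : Nat) =>
        ((if answers.getD x 0 = PySem.List.pyGetD [1, 2, 3, 4, 5] (PySem.Int.mod (x : Int) 5) 0 then s.1 + 1 else s.1),
         (if answers.getD x 0 = PySem.List.pyGetD [2, 1, 2, 3, 2, 4, 2, 5] (PySem.Int.mod (x : Int) 8) 0 then s.2.1 + 1 else s.2.1),
         (if answers.getD x 0 = PySem.List.pyGetD [3, 3, 1, 1, 2, 2, 4, 4, 5, 5] (PySem.Int.mod (x : Int) 10) 0 then s.2.2 + 1 else s.2.2)))
      = (fun (s : Int × Int × Int) (x : Nat) =>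
          ((fun (c : Int) x => if answers.getD x 0 = PySem.List.pyGetD [1, 2, 3, 4, 5] (PySem.Int.mod (x : Int) 5) 0 then c + 1 else c) s.1 x,
           (fun (s' : Int × Int) x =>
             ((fun (c : Int) x => if answers.getD x 0 = PySem.List.pyGetD [2, 1, 2, 3, 2, 4, 2, 5] (PySem.Int.mod (x : Int) 8) 0 then c + 1 else c) s'.1 x,
              (fun (c : Int) x => if answers.getD x 0 = PySem.List.pyGetD [3, 3, 1, 1, 2, 2, 4, 4, 5, 5] (PySem.Int.mod (x : Int) 10) 0 then c + 1 else c) s'.2 x)) s.2 x))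
      from rfl]
  rw [PySem.List.foldl_prod_mk (fun (c : Int) (x : Nat) => if answers.getD x 0 = PySem.List.pyGetD [1, 2, 3, 4, 5] (PySem.Int.mod (x : Int) 5) 0 then c + 1 else c)
      (fun (s' : Int × Int) (x : Nat) => ((fun (c : Int) (x : Nat) => if answers.getD x 0 = PySem.List.pyGetD [2, 1, 2, 3, 2, 4, 2, 5] (PySem.Int.mod (x : Int) 8) 0 then c + 1 else c) s'.1 x, (fun (c : Int) (x : Nat) => if answers.getD x 0 = PySem.List.pyGetD [3, 3, 1, 1, 2, 2, 4, 4, 5, 5] (PySem.Int.mod (x : Int) 10) 0 then c + 1 else c) s'.2 x))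
      (List.range answers.length) 0 (0, 0),
    PySem.List.foldl_prod_mk (fun (c : Int) (x : Nat) => if answers.getD x 0 = PySem.List.pyGetD [2, 1, 2, 3, 2, 4, 2, 5] (PySem.Int.mod (x : Int) 8) 0 then c + 1 else c) (fun (c : Int) (x : Nat) => if answers.getD x 0 = PySem.List.pyGetD [3, 3, 1, 1, 2, 2, 4, 4, 5, 5] (PySem.Int.mod (x : Int) 10) 0 then c + 1 else c) (List.range answers.length) 0 0]
  rw [count_fold, count_fold, count_fold]
  -- B's side: the three table-lookup scores, best, and the argmax collection
  simp only [List.map_cons, List.map_nil]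
  simp only [score_eq answers [1, 2, 3, 4, 5] (by decide),
    score_eq answers [2, 1, 2, 3, 2, 4, 2, 5] (by decide),
    score_eq answers [3, 3, 1, 1, 2, 2, 4, 4, 5, 5] (by decide), max3]
  simp only [PySem.List.enumerate, List.filter_cons, List.filter_nil]
  norm_num
  generalize List.countP (fun (j : Nat) => decide (answers[j]?.getD 0 = PySem.List.pyGetD [1, 2, 3, 4, 5] ((j : Int) % 5) 0)) (List.range answers.length) = c1
  generalize List.countP (fun (j : Nat) => decide (answers[j]?.getD 0 = PySem.List.pyGetD [2, 1, 2, 3, 2, 4, 2, 5] ((j : Int) % 8) 0)) (List.range answers.length) = c2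
  generalize List.countP (fun (j : Nat) => decide (answers[j]?.getD 0 = PySem.List.pyGetD [3, 3, 1, 1, 2, 2, 4, 4, 5, 5] ((j : Int) % 10) 0)) (List.range answers.length) = c3
  split_ifs <;> first | (simp; done) | (exfalso; omega)

-- ===== VERDICT (by name: the statement is the Claim_ definition above) =====
theorem solution_spec : Claim_equal_solution := by
  intro answers _
  unfold Spec_solution
  exact solution_eq_alt answers
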